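-- pv_equiv track=rewrite | github.com/AerysNan/KDVA | tools/util/data_split.py | generate_sample_position
-- ===== SOURCE A (Python) =====
-- def generate_sample_position(n_samples, n_frames, offset=0):
--     sample_win, total = [1 for _ in range(n_samples)], n_samples
--     while total < n_frames:
--         for i in range(n_samples):
--             sample_win[i] += 1
--             total += 1
--             if total == n_frames:
--                 break
--     pos = [offset]
--     for i in range(n_samples - 1):
--         pos.append(pos[-1] + sample_win[i])
--     return pos
-- ===== SOURCE B (Python) =====
-- def generate_sample_position(n_samples, n_frames, offset=0):
--     if n_samples <= 0:
--         return [offset]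
--     q, r = divmod(max(n_frames - n_samples, 0), n_samples)
--     first = offset + r * (q + 2)
--     return list(range(offset, first, q + 2)) + \
--         list(range(first, first + (n_samples - r) * (q + 1), q + 1))
-- ===== Notes on version B (the rewrite author's own statement) =====
-- stated objective: faster
-- what changed: replaces the O(n_frames) round-robin while-loop and the element-by-element prefix-sum append loop with a single divmod giving the two window sizes in closed form, emitting the result as two arithmetic progressions (two range() calls)
import Mathlib
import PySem

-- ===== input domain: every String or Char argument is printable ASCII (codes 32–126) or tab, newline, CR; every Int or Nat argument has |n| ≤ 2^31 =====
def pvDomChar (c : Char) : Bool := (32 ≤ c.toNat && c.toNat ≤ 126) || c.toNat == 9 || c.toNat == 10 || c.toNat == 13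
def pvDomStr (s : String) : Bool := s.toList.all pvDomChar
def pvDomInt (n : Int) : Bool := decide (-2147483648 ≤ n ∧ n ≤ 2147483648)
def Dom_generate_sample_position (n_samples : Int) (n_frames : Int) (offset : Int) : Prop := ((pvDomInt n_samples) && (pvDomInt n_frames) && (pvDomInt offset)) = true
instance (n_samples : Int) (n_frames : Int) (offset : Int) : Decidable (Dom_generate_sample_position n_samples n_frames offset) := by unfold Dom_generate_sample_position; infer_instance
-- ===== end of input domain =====

-- B replaces A's frame-by-frame round-robin while-loop and incremental append loop by a
-- single divmod and the two resulting arithmetic progressions (objective: faster).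

-- ===== PORT A =====
-- inner `for i in range(n_samples)` pass of the while loop: increments each remaining
-- window, counts `total` up, breaks as soon as total == n_frames
def pvInnerA (acc : List Int) (rest : List Int) (total : Int) (n_frames : Int) :
    List Int × Int :=
  match rest with
  | [] => (acc, total)
  | w :: rs =>
      if total + 1 = n_frames then (acc ++ (w + 1) :: rs, total + 1)
      else pvInnerA (acc ++ [w + 1]) rs (total + 1) n_frames

-- termination helper for the while loop (cited by `decreasing_by` below)
theorem pvInnerA_le (rest : List Int) : ∀ (acc : List Int) (total f : Int),
    total ≤ (pvInnerA acc rest total f).2 := by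
  induction rest with
  | nil => intro acc total f; simp [pvInnerA]
  | cons w rs ih =>
      intro acc total f
      simp only [pvInnerA]
      split
      · omega
      · exact le_trans (by omega) (ih (acc ++ [w + 1]) (total + 1) f)

-- the `while total < n_frames` loop; Python loops forever when a pass makes no
-- progress (n_samples ≤ 0), which the `p.2 = total` guard turns into a return —
-- those inputs are outside Pre_
def pvOuterA (win : List Int) (total : Int) (n_frames : Int) : List Int :=
  if _h : total < n_frames then
    if _h2 : (pvInnerA [] win total n_frames).2 = total then (pvInnerA [] win total n_frames).1
    else pvOuterA (pvInnerA [] win total n_frames).1 (pvInnerA [] win total n_frames).2 n_frames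
  else win
termination_by (n_frames - total).toNat
decreasing_by
  have := pvInnerA_le win [] total n_frames
  omega

def generate_sample_position (n_samples : Int) (n_frames : Int) (offset : Int) : List Int :=
  -- sample_win, total = [1 for _ in range(n_samples)], n_samples
  let sample_win := (PySem.List.pyRange 0 n_samples 1).map (fun _ => (1 : Int))
  let win := pvOuterA sample_win n_samples n_frames
  -- pos = [offset]; for i in range(n_samples - 1): pos.append(pos[-1] + sample_win[i])
  -- (pyGetD is exact under Pre_, where the index is always in range)
  (PySem.List.pyRange 0 (n_samples - 1) 1).foldl
    (fun pos i => pos ++ [PySem.List.pyGetD pos (-1) 0 + PySem.List.pyGetD win i 0])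
    [offset]

-- ===== PORT B =====
def generate_sample_position_alt (n_samples : Int) (n_frames : Int) (offset : Int) : List Int :=
  if n_samples ≤ 0 then [offset]
  else
    let q := PySem.Int.floordiv (max (n_frames - n_samples) 0) n_samples
    let r := PySem.Int.mod (max (n_frames - n_samples) 0) n_samples
    let first := offset + r * (q + 2)
    PySem.List.pyRange offset first (q + 2) ++
      PySem.List.pyRange first (first + (n_samples - r) * (q + 1)) (q + 1)

-- ===== PRECONDITION & SPEC =====
-- Pre_ excludes exactly the inputs on which A never returns: with n_samples ≤ 0 and
-- n_frames > n_samples the inner for-loop is empty, so `total` never advances and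
-- A's while loop runs forever.
def Pre_generate_sample_position (n_samples : Int) (n_frames : Int) (offset : Int) : Prop :=
  0 < n_samples ∨ n_frames ≤ n_samples
instance (n_samples : Int) (n_frames : Int) (offset : Int) : Decidable (Pre_generate_sample_position n_samples n_frames offset) := by unfold Pre_generate_sample_position; infer_instance
def pvWitness_generate_sample_position : Int × Int × Int := (3, 10, 2)

def Spec_generate_sample_position (n_samples : Int) (n_frames : Int) (offset : Int) (out : List Int) : Prop := out = generate_sample_position_alt n_samples n_frames offset
instance (n_samples : Int) (n_frames : Int) (offset : Int) (out : List Int) : Decidable (Spec_generate_sample_position n_samples n_frames offset out) := by unfold Spec_generate_sample_position; infer_instance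

-- ===== CLAIM (what is proved, stated in full; the proofs are below) =====
def Claim_equal_generate_sample_position : Prop := ∀ (n_samples : Int) (n_frames : Int) (offset : Int), Dom_generate_sample_position n_samples n_frames offset → Pre_generate_sample_position n_samples n_frames offset → Spec_generate_sample_position n_samples n_frames offset (generate_sample_position n_samples n_frames offset)

-- ===== LEMMAS AND PROOFS =====

-- a full inner pass (break never fires)
theorem pvInnerA_full (rest : List Int) : ∀ (acc : List Int) (total f : Int),
    total + rest.length < f →
    pvInnerA acc rest total f = (acc ++ rest.map (· + 1), total + rest.length) := by
  induction rest with
  | nil => intro acc total f _; simp [pvInnerA]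
  | cons w rs ih =>
      intro acc total f h
      simp only [List.length_cons] at h
      have hne : ¬ (total + 1 = f) := by omega
      simp only [pvInnerA, hne, if_false]
      rw [ih (acc ++ [w + 1]) (total + 1) f (by omega)]
      simp only [Prod.mk.injEq, List.map_cons, List.length_cons]
      exact ⟨by simp [List.append_assoc], by omega⟩

-- a partial inner pass over a uniform window list (break fires)
theorem pvInnerA_partial (n : Nat) : ∀ (acc : List Int) (b total f : Int),
    total < f → f ≤ total + n →
    pvInnerA acc (List.replicate n b) total f =
      (acc ++ List.replicate (f - total).toNat (b + 1)
           ++ List.replicate (n - (f - total).toNat) b, f) := by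
  induction n with
  | zero => intro acc b total f h1 h2; omega
  | succ m ih =>
      intro acc b total f h1 h2
      rw [List.replicate_succ]
      by_cases hb : total + 1 = f
      · have : (f - total).toNat = 1 := by omega
        simp [pvInnerA, hb, this, List.replicate_succ]
      · simp only [pvInnerA, hb, if_false]
        rw [ih (acc ++ [b + 1]) b (total + 1) f (by omega) (by omega)]
        have h3 : (f - total).toNat = (f - (total + 1)).toNat + 1 := by omega
        have h4 : m + 1 - ((f - (total + 1)).toNat + 1) = m - (f - (total + 1)).toNat := by
          omega
        rw [h3, h4, List.replicate_succ]
        simp [List.append_assoc]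

-- the while loop starting from a uniform window list; B brackets the final level
theorem pvOuterA_char (n : Nat) (hn : 0 < n) (f B : Int)
    (hB1 : (n : Int) * B < f) (hB2 : f ≤ (n : Int) * (B + 1)) :
    ∀ (b : Int), b ≤ B →
    pvOuterA (List.replicate n b) ((n : Int) * b) f =
      List.replicate (f - (n : Int) * B).toNat (B + 1)
        ++ List.replicate (n - (f - (n : Int) * B).toNat) B := by
  have hnn : (0 : Int) < (n : Int) := by exact_mod_cast hn
  suffices key : ∀ (k : Nat) (b : Int), b ≤ B → (B - b).toNat = k →
      pvOuterA (List.replicate n b) ((n : Int) * b) f =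
        List.replicate (f - (n : Int) * B).toNat (B + 1)
          ++ List.replicate (n - (f - (n : Int) * B).toNat) B by
    intro b hb; exact key (B - b).toNat b hb rfl
  intro k
  induction k with
  | zero =>
      intro b hb hk
      have hbB : b = B := by omega
      subst hbB
      have hlt : (n : Int) * b < f := hB1
      rw [pvOuterA, dif_pos hlt,
        pvInnerA_partial n [] b ((n : Int) * b) f hlt (by nlinarith)]
      have hne : ¬ (f = (n : Int) * b) := by omega
      simp only [hne, dif_neg, not_false_iff]
      rw [pvOuterA, dif_neg (by omega : ¬ f < f)]
      simp
  | succ k ih =>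
      intro b hb hk
      by_cases hfull : (n : Int) * b + n < f
      · -- full pass, recurse at b + 1
        have hlt : (n : Int) * b < f := by nlinarith
        rw [pvOuterA, dif_pos hlt,
          pvInnerA_full (List.replicate n b) [] ((n : Int) * b) f (by simpa using hfull)]
        simp only [List.length_replicate, List.map_replicate, List.nil_append]
        have hne : ¬ ((n : Int) * b + (n : Nat) = (n : Int) * b) := by omega
        simp only [hne, dif_neg, not_false_iff]
        have hb1 : b + 1 ≤ B := by nlinarith
        have harith : (n : Int) * b + (n : Nat) = (n : Int) * (b + 1) := by ring
        rw [harith]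
        exact ih (b + 1) hb1 (by omega)
      · -- last (possibly partial) pass: b must be B
        have hlt : (n : Int) * b < f := by nlinarith
        have hbB : b = B := by nlinarith
        subst hbB
        rw [pvOuterA, dif_pos hlt,
          pvInnerA_partial n [] b ((n : Int) * b) f hlt (by omega)]
        have hne : ¬ (f = (n : Int) * b) := by omega
        simp only [hne, dif_neg, not_false_iff]
        rw [pvOuterA, dif_neg (by omega : ¬ f < f)]
        simp

-- the final window sizes in closed form, as B computes them
theorem pvWin_char (n : Nat) (hn : 0 < n) (f : Int) :
    pvOuterA (List.replicate n 1) (n : Int) f =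
      List.replicate (PySem.Int.mod (max (f - n) 0) n).toNat
          (PySem.Int.floordiv (max (f - n) 0) n + 2)
        ++ List.replicate (n - (PySem.Int.mod (max (f - n) 0) n).toNat)
          (PySem.Int.floordiv (max (f - n) 0) n + 1) := by
  have hnn : (0 : Int) < (n : Int) := by exact_mod_cast hn
  by_cases hf : f ≤ (n : Int)
  · -- while loop never entered; max (f - n) 0 = 0
    have hmax : max (f - (n : Int)) 0 = 0 := by omega
    rw [hmax, PySem.Int.floordiv_eq_ediv_of_pos hnn, PySem.Int.mod_eq_emod_of_pos hnn]
    rw [pvOuterA, dif_neg (by omega : ¬ (n : Int) < f)]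
    simp
  · -- n < f: apply pvOuterA_char at b = 1
    have hmax : max (f - (n : Int)) 0 = f - n := by omega
    rw [hmax]
    set q := PySem.Int.floordiv (f - (n : Int)) n with hq
    set r := PySem.Int.mod (f - (n : Int)) n with hr
    have hqr : q * (n : Int) + r = f - n := PySem.Int.floordiv_mul_add_mod _ _
    have hr0 : 0 ≤ r := PySem.Int.mod_nonneg _ hnn
    have hrn : r < (n : Int) := PySem.Int.mod_lt _ hnn
    have hq0 : 0 ≤ q := by nlinarith
    have hone : ((n : Int)) = (n : Int) * 1 := by ring
    by_cases hr0' : r = 0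
    · -- exact division: final level is q, filled completely
      have h1 : (n : Int) * q < f := by nlinarith
      have h2 : f ≤ (n : Int) * (q + 1) := by nlinarith
      have hb : (1 : Int) ≤ q := by nlinarith
      rw [hone, pvOuterA_char n hn f q h1 h2 1 hb]
      have hc : (f - (n : Int) * q).toNat = n := by
        have : f - (n : Int) * q = n := by nlinarith
        omega
      rw [hc, hr0']
      simp
    · -- r > 0: final level is q + 1, r windows get one more
      have hrpos : 0 < r := by omega
      have hcomm : (n : Int) * q = q * (n : Int) := mul_comm _ _
      have h1 : (n : Int) * (q + 1) < f := by nlinarith [hrpos, hcomm]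
      have h2 : f ≤ (n : Int) * (q + 1 + 1) := by nlinarith [hrn, hcomm]
      have hb : (1 : Int) ≤ q + 1 := by nlinarith
      rw [hone, pvOuterA_char n hn f (q + 1) h1 h2 1 hb]
      have hc : f - (n : Int) * (q + 1) = r := by nlinarith [hcomm]
      rw [hc, show q + 1 + 1 = q + 2 from by ring]

-- entry k of the final window list, as a difference of B's position formula
theorem pvWin_get (a c : Nat) (x y : Int) (k : Nat) (h : k < a + c) :
    PySem.List.pyGetD (List.replicate a x ++ List.replicate c y) (k : Int) 0 =
      if k < a then x else y := by
  rw [PySem.List.pyGetD_natCast]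
  by_cases hk : k < a
  · simp [List.getD, List.getElem?_append_left, hk]
  · have h1 : (List.replicate a x).length ≤ k := by simpa using Nat.le_of_not_lt hk
    have h2 : k - a < c := by omega
    simp only [List.getD, List.getElem?_append_right h1]
    simp [h2, hk]

-- A's append loop builds exactly the list of P-values
theorem pvFold_prefix (P : Int → Int) (win : List Int) (m : Nat)
    (hw : ∀ k : Nat, k < m → PySem.List.pyGetD win (k : Int) 0 = P ((k : Int) + 1) - P k) :
    (PySem.List.pyRange 0 (m : Int) 1).foldl
      (fun pos i => pos ++ [PySem.List.pyGetD pos (-1) 0 + PySem.List.pyGetD win i 0])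
      [P 0]
    = List.map (fun k : Nat => P (k : Int)) (List.range (m + 1)) := by
  induction m with
  | zero => simp [PySem.List.pyRange]
  | succ m ih =>
      have hr : PySem.List.pyRange 0 ((m : Int) + 1) 1 =
          PySem.List.pyRange 0 (m : Int) 1 ++ [(m : Int)] :=
        PySem.List.pyRange_one_succ_right (by positivity)
      have hm : ((m + 1 : Nat) : Int) = (m : Int) + 1 := by push_cast; ring
      rw [hm, hr, List.foldl_append, ih (fun k hk => hw k (by omega))]
      have hlast : List.map (fun k : Nat => P (k : Int)) (List.range (m + 1)) =
          List.map (fun k : Nat => P (k : Int)) (List.range m) ++ [P (m : Int)] := by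
        rw [List.range_succ, List.map_append]; simp
      rw [List.foldl_cons, List.foldl_nil, hlast, PySem.List.pyGetD_neg_one_append_singleton,
        hw m (by omega)]
      have hP : P (m : Int) + (P ((m : Int) + 1) - P (m : Int)) = P ((m : Int) + 1) := by ring
      rw [hP, List.range_succ (n := m + 1), List.map_append, hlast]
      simp

-- B's two arithmetic progressions are the same list of P-values
theorem pvAlt_ranges (off q r : Int) (N : Nat) (hq : 0 ≤ q) (hr0 : 0 ≤ r)
    (hrn : r < (N : Int)) :
    PySem.List.pyRange off (off + r * (q + 2)) (q + 2) ++
      PySem.List.pyRange (off + r * (q + 2))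
        (off + r * (q + 2) + ((N : Int) - r) * (q + 1)) (q + 1)
      = List.map (fun k : Nat => off + (k : Int) * (q + 1) + min (k : Int) r)
          (List.range N) := by
  have hhead : PySem.List.pyRange off (off + r * (q + 2)) (q + 2) =
      List.map (fun k : Nat => off + (k : Int) * (q + 2)) (List.range r.toNat) := by
    rw [PySem.List.pyRange_of_pos _ _ (by omega)]
    by_cases hr : 0 < r
    · rw [if_pos (by nlinarith)]
      have hcnt : (off + r * (q + 2) - off + (q + 2) - 1) / (q + 2) = r := by
        have : off + r * (q + 2) - off + (q + 2) - 1 = (q + 1) + r * (q + 2) := by ring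
        rw [this, Int.add_mul_ediv_right _ _ (by omega : q + 2 ≠ 0),
          Int.ediv_eq_zero_of_lt (by omega) (by omega)]
        ring
      rw [hcnt]
      exact List.map_congr_left fun k hk => by ring
    · have hr' : r = 0 := by omega
      rw [if_neg (by nlinarith [hr'] : ¬ off < off + r * (q + 2))]
      simp [hr']
  have htail : PySem.List.pyRange (off + r * (q + 2))
      (off + r * (q + 2) + ((N : Int) - r) * (q + 1)) (q + 1) =
      List.map (fun k : Nat => off + r * (q + 2) + (k : Int) * (q + 1))
        (List.range ((N : Int) - r).toNat) := by
    rw [PySem.List.pyRange_of_pos _ _ (by omega)]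
    rw [if_pos (by nlinarith : off + r * (q + 2) <
      off + r * (q + 2) + ((N : Int) - r) * (q + 1))]
    have hcnt : (off + r * (q + 2) + ((N : Int) - r) * (q + 1) - (off + r * (q + 2))
        + (q + 1) - 1) / (q + 1) = (N : Int) - r := by
      have : off + r * (q + 2) + ((N : Int) - r) * (q + 1) - (off + r * (q + 2))
          + (q + 1) - 1 = q + ((N : Int) - r) * (q + 1) := by ring
      rw [this, Int.add_mul_ediv_right _ _ (by omega : q + 1 ≠ 0),
        Int.ediv_eq_zero_of_lt (by omega) (by omega)]
      ring
    rw [hcnt]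
    exact List.map_congr_left fun k hk => by ring
  rw [hhead, htail]
  have hsplit : N = r.toNat + ((N : Int) - r).toNat := by omega
  rw [show List.range N = List.range (r.toNat + ((N : Int) - r).toNat) from by rw [← hsplit],
    List.range_add, List.map_append, List.map_map]
  congr 1
  · refine List.map_congr_left fun k hk => ?_
    have hkr : (k : Int) < r := by
      have := List.mem_range.mp hk; omega
    rw [min_eq_left (by omega : (k : Int) ≤ r)]
    ring
  · refine List.map_congr_left fun k hk => ?_
    have : ((r.toNat + k : Nat) : Int) = r + (k : Int) := by omega
    simp only [Function.comp_apply, this]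
    rw [min_eq_right (by omega : r ≤ r + (k : Int))]
    ring

-- ===== VERDICT (by name: the statement is the Claim_ definition above) =====
theorem generate_sample_position_spec : Claim_equal_generate_sample_position := by
  intro ns f off _dom hpre
  unfold Pre_generate_sample_position at hpre
  unfold Spec_generate_sample_position generate_sample_position generate_sample_position_alt
  by_cases hns : ns ≤ 0
  · -- no samples: both sides are [offset]
    have hf : f ≤ ns := by omega
    rw [if_pos hns]
    have h0 : PySem.List.pyRange 0 ns 1 = [] := PySem.List.pyRange_one_eq_nil hns
    have h1 : PySem.List.pyRange 0 (ns - 1) 1 = [] := PySem.List.pyRange_one_eq_nil (by omega)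
    simp only [h0, h1, List.map_nil, List.foldl_nil]
  · rw [not_le] at hns
    obtain ⟨N, rfl⟩ : ∃ N : Nat, ns = (N : Int) :=
      ⟨ns.toNat, (Int.toNat_of_nonneg hns.le).symm⟩
    have hNpos : 0 < N := by exact_mod_cast hns
    rw [if_neg (by omega : ¬ ((N : Int) ≤ 0))]
    simp only []
    set q := PySem.Int.floordiv (max (f - (N : Int)) 0) (N : Int) with hq
    set r := PySem.Int.mod (max (f - (N : Int)) 0) (N : Int) with hr
    have hnn : (0 : Int) < (N : Int) := by exact_mod_cast hNpos
    have hr0 : 0 ≤ r := PySem.Int.mod_nonneg _ hnn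
    have hrn : r < (N : Int) := PySem.Int.mod_lt _ hnn
    set P : Int → Int := fun k => off + k * (q + 1) + min k r with hP
    have hP0 : P 0 = off := by
      simp [hP, min_eq_left hr0]
    have hwin : (PySem.List.pyRange 0 (N : Int) 1).map (fun _ => (1 : Int)) =
        List.replicate N 1 := by
      rw [PySem.List.pyRange_zero_natCast, List.map_map]
      simp [List.eq_replicate_iff]
    rw [hwin, pvWin_char N hNpos f, ← hq, ← hr]
    have hcast : (N : Int) - 1 = ((N - 1 : Nat) : Int) := by omega
    have hw : ∀ k : Nat, k < N - 1 →
        PySem.List.pyGetD (List.replicate r.toNat (q + 2)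
            ++ List.replicate (N - r.toNat) (q + 1)) (k : Int) 0 =
          P ((k : Int) + 1) - P (k : Int) := by
      intro k hk
      rw [pvWin_get r.toNat (N - r.toNat) (q + 2) (q + 1) k (by omega)]
      by_cases hkr : k < r.toNat
      · have h1 : (k : Int) + 1 ≤ r := by omega
        have h2 : (k : Int) ≤ r := by omega
        rw [if_pos hkr]
        simp [hP, min_eq_left h1, min_eq_left h2]
        ring
      · have h1 : r ≤ (k : Int) + 1 := by omega
        have h2 : r ≤ (k : Int) := by omega
        rw [if_neg hkr]
        simp [hP, min_eq_right h1, min_eq_right h2]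
        ring
    have hq0 : 0 ≤ q := by
      rw [hq, PySem.Int.floordiv_eq_ediv_of_pos hnn]
      exact Int.ediv_nonneg (le_max_right _ _) hnn.le
    rw [pvAlt_ranges off q r N hq0 hr0 hrn]
    have hm1 : (N : Int) - 1 = ((N - 1 : Nat) : Int) := hcast
    rw [hm1, ← hP0, pvFold_prefix P _ (N - 1) hw]
    have hN1 : N - 1 + 1 = N := by omega
    rw [hN1]
    simp only [hP]
    simp [min_eq_left hr0]
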